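-- pv_equiv track=rewrite | github.com/GaneshPrasadBhandari/careeragent-ai | src/careeragent/managers/l3_managers.py | _cluster_skills
-- ===== SOURCE A (Python) =====
-- from typing import Any, Dict, List, Tuple
--
-- def _cluster_skills(skills: List[str]) -> Dict[str, List[str]]:
--     taxonomy = {
--         "cloud": ["aws", "azure", "gcp", "cloud", "kubernetes", "docker", "ec2"],
--         "data": ["sql", "spark", "airflow", "dbt", "etl", "warehouse", "snowflake"],
--         "backend": ["python", "java", "golang", "node", "api", "microservices", "fastapi"],
--         "frontend": ["react", "typescript", "javascript", "next", "ui", "css", "html"],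
--         "ai_ml": ["llm", "langchain", "langgraph", "ml", "ai", "pytorch", "tensorflow", "rag"],
--         "devops": ["terraform", "ansible", "jenkins", "github actions", "ci/cd", "prometheus"],
--     }
--     clusters: Dict[str, List[str]] = {k: [] for k in taxonomy}
--     clusters["general"] = []
--     for sk in skills:
--         low = sk.lower()
--         matched = False
--         for group, hints in taxonomy.items():
--             if any(h in low for h in hints):
--                 clusters[group].append(sk)
--                 matched = True
--         if not matched:
--             clusters["general"].append(sk)
--     return {k: v for k, v in clusters.items() if v}
-- ===== SOURCE B (Python) =====
-- from typing import Any, Dict, List, Tuple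
--
-- def _cluster_skills(skills: List[str]) -> Dict[str, List[str]]:
--     taxonomy = {
--         "cloud": ["aws", "azure", "gcp", "cloud", "kubernetes", "docker", "ec2"],
--         "data": ["sql", "spark", "airflow", "dbt", "etl", "warehouse", "snowflake"],
--         "backend": ["python", "java", "golang", "node", "api", "microservices", "fastapi"],
--         "frontend": ["react", "typescript", "javascript", "next", "ui", "css", "html"],
--         "ai_ml": ["llm", "langchain", "langgraph", "ml", "ai", "pytorch", "tensorflow", "rag"],
--         "devops": ["terraform", "ansible", "jenkins", "github actions", "ci/cd", "prometheus"],
--     }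
--     out: Dict[str, List[str]] = {}
--     for group, hints in taxonomy.items():
--         members = [sk for sk in skills if any(h in sk.lower() for h in hints)]
--         if members:
--             out[group] = members
--     general = [sk for sk in skills
--                if not any(h in sk.lower() for hints in taxonomy.values() for h in hints)]
--     if general:
--         out["general"] = general
--     return out
-- ===== Notes on version B (the rewrite author's own statement) =====
-- stated objective: simpler
-- what changed: Group-major rewrite: instead of A's skill-major loop that mutates a pre-built dict of buckets and tracks a matched flag, B builds each group's member list with one filter per taxonomy group (dropping empty groups as it goes) and computes the 'general' bucket as a separate filter over skills that match no group, preserving taxonomy order with 'general' last.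
import Mathlib
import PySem

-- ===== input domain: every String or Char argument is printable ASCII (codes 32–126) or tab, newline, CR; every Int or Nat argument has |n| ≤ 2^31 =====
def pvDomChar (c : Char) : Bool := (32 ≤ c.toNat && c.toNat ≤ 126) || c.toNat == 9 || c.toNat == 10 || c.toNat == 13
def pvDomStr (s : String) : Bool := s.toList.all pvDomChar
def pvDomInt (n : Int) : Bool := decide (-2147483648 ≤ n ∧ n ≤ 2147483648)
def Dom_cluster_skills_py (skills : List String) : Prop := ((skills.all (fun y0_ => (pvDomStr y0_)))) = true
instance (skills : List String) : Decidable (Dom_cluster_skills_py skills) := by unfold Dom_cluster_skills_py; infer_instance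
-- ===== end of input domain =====

-- B rewrites the clustering group-major (one filter pass per taxonomy group, then the
-- general bucket as a separate filter) instead of A's skill-major dict-mutation loop;
-- objective: simpler. Same return value; neither mutates its argument.

-- The taxonomy literal both Pythons contain verbatim.
def pvTax : List (String × List String) :=
  [("cloud", ["aws", "azure", "gcp", "cloud", "kubernetes", "docker", "ec2"]),
   ("data", ["sql", "spark", "airflow", "dbt", "etl", "warehouse", "snowflake"]),
   ("backend", ["python", "java", "golang", "node", "api", "microservices", "fastapi"]),
   ("frontend", ["react", "typescript", "javascript", "next", "ui", "css", "html"]),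
   ("ai_ml", ["llm", "langchain", "langgraph", "ml", "ai", "pytorch", "tensorflow", "rag"]),
   ("devops", ["terraform", "ansible", "jenkins", "github actions", "ci/cd", "prometheus"])]

-- any(h in low for h in hints)
def pvHitL (hints : List String) (low : String) : Bool :=
  hints.any (fun h => PySem.Str.isIn h low)

-- ===== PORT A =====
def cluster_skills_py (skills : List String) : List (String × List String) :=
  let taxonomy := PySem.Dict.ofList pvTax
  let clusters : PySem.Dict String (List String) :=
    PySem.Dict.ofList (taxonomy.keys.map (fun k => (k, ([] : List String))))
  let clusters := clusters.insert "general" []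
  let clusters := skills.foldl (fun c sk =>
      let low := PySem.Str.lower sk
      let r := taxonomy.items.foldl
        (fun (p : PySem.Dict String (List String) × Bool) gh =>
          if pvHitL gh.2 low
          then (p.1.modify gh.1 [] (fun v => v ++ [sk]), true)
          else p) (c, false)
      if !r.2 then r.1.modify "general" [] (fun v => v ++ [sk]) else r.1) clusters
  clusters.items.filter (fun kv => !kv.2.isEmpty)

-- ===== PORT B =====
def cluster_skills_py_alt (skills : List String) : List (String × List String) :=
  let out := pvTax.filterMap (fun gh =>
      let members := skills.filter (fun sk => pvHitL gh.2 (PySem.Str.lower sk))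
      if members.isEmpty then none else some (gh.1, members))
  let general := skills.filter
      (fun sk => !pvTax.any (fun gh => pvHitL gh.2 (PySem.Str.lower sk)))
  if general.isEmpty then out else out ++ [("general", general)]

-- ===== PRECONDITION & SPEC =====
def Spec_cluster_skills_py (skills : List String) (out : List (String × List String)) : Prop := out = cluster_skills_py_alt skills
instance (skills : List String) (out : List (String × List String)) : Decidable (Spec_cluster_skills_py skills out) := by unfold Spec_cluster_skills_py; infer_instance

-- ===== CLAIM (what is proved, stated in full; the proofs are below) =====
def Claim_equal_cluster_skills_py : Prop := ∀ (skills : List String), Dom_cluster_skills_py skills → Spec_cluster_skills_py skills (cluster_skills_py skills)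

-- ===== LEMMAS AND PROOFS =====

-- the six per-group membership predicates and the "no group matched" predicate
def pvP1 : String → Bool := fun sk => pvHitL ["aws", "azure", "gcp", "cloud", "kubernetes", "docker", "ec2"] (PySem.Str.lower sk)
def pvP2 : String → Bool := fun sk => pvHitL ["sql", "spark", "airflow", "dbt", "etl", "warehouse", "snowflake"] (PySem.Str.lower sk)
def pvP3 : String → Bool := fun sk => pvHitL ["python", "java", "golang", "node", "api", "microservices", "fastapi"] (PySem.Str.lower sk)
def pvP4 : String → Bool := fun sk => pvHitL ["react", "typescript", "javascript", "next", "ui", "css", "html"] (PySem.Str.lower sk)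
def pvP5 : String → Bool := fun sk => pvHitL ["llm", "langchain", "langgraph", "ml", "ai", "pytorch", "tensorflow", "rag"] (PySem.Str.lower sk)
def pvP6 : String → Bool := fun sk => pvHitL ["terraform", "ansible", "jenkins", "github actions", "ci/cd", "prometheus"] (PySem.Str.lower sk)
def pvPg : String → Bool := fun sk => !pvTax.any (fun gh => pvHitL gh.2 (PySem.Str.lower sk))

-- the body of A's loop over skills, as a named function (defeq to the lambda in the port)
def pvStepA (c : PySem.Dict String (List String)) (sk : String) : PySem.Dict String (List String) :=
  let low := PySem.Str.lower sk
  let r := pvTax.foldl (fun (p : PySem.Dict String (List String) × Bool) gh =>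
      if pvHitL gh.2 low
      then (p.1.modify gh.1 [] (fun v => v ++ [sk]), true)
      else p) (c, false)
  if !r.2 then r.1.modify "general" [] (fun v => v ++ [sk]) else r.1

-- one iteration of A's outer loop appends sk to exactly the matching groups (or to general)
set_option maxHeartbeats 1000000 in
theorem pvStepA_eq (sk : String) (v1 v2 v3 v4 v5 v6 v7 : List String) :
    pvStepA (PySem.Dict.mk [("cloud",v1),("data",v2),("backend",v3),("frontend",v4),("ai_ml",v5),("devops",v6),("general",v7)]) sk
    = PySem.Dict.mk [("cloud", v1 ++ if pvP1 sk then [sk] else []),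
        ("data", v2 ++ if pvP2 sk then [sk] else []),
        ("backend", v3 ++ if pvP3 sk then [sk] else []),
        ("frontend", v4 ++ if pvP4 sk then [sk] else []),
        ("ai_ml", v5 ++ if pvP5 sk then [sk] else []),
        ("devops", v6 ++ if pvP6 sk then [sk] else []),
        ("general", v7 ++ if pvPg sk then [sk] else [])] := by
  cases h1 : pvP1 sk <;> cases h2 : pvP2 sk <;> cases h3 : pvP3 sk <;>
  cases h4 : pvP4 sk <;> cases h5 : pvP5 sk <;> cases h6 : pvP6 sk <;>
  · simp only [pvP1, pvP2, pvP3, pvP4, pvP5, pvP6] at h1 h2 h3 h4 h5 h6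
    simp only [pvStepA, pvTax, List.foldl, pvPg, List.any_cons, List.any_nil,
      h1, h2, h3, h4, h5, h6, Bool.false_eq_true, ite_true, ite_false,
      Bool.not_true, Bool.not_false, Bool.or_false, Bool.or_true, List.append_nil]
    rfl

theorem pv_ite_filter (v : List String) (p : String → Bool) (x : String) (l : List String) :
    (v ++ if p x then [x] else []) ++ l.filter p = v ++ (x :: l).filter p := by
  cases h : p x <;> simp [List.filter_cons, h]

theorem pv_fold_eq (skills : List String) (v1 v2 v3 v4 v5 v6 v7 : List String) :
    skills.foldl pvStepA (PySem.Dict.mk [("cloud",v1),("data",v2),("backend",v3),("frontend",v4),("ai_ml",v5),("devops",v6),("general",v7)])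
    = PySem.Dict.mk [("cloud", v1 ++ skills.filter pvP1),
        ("data", v2 ++ skills.filter pvP2),
        ("backend", v3 ++ skills.filter pvP3),
        ("frontend", v4 ++ skills.filter pvP4),
        ("ai_ml", v5 ++ skills.filter pvP5),
        ("devops", v6 ++ skills.filter pvP6),
        ("general", v7 ++ skills.filter pvPg)] := by
  induction skills generalizing v1 v2 v3 v4 v5 v6 v7 with
  | nil => simp
  | cons sk rest ih =>
      rw [List.foldl_cons, pvStepA_eq, ih,
        pv_ite_filter v1 pvP1 sk rest, pv_ite_filter v2 pvP2 sk rest,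
        pv_ite_filter v3 pvP3 sk rest, pv_ite_filter v4 pvP4 sk rest,
        pv_ite_filter v5 pvP5 sk rest, pv_ite_filter v6 pvP6 sk rest,
        pv_ite_filter v7 pvPg sk rest]

-- B's filterMap over a mapped list is A's "drop the empties" filter
theorem pv_fmfilter (skills : List String) (l : List (String × List String)) :
    (l.map (fun gh => (gh.1, skills.filter (fun sk => pvHitL gh.2 (PySem.Str.lower sk))))).filter
        (fun kv => !kv.2.isEmpty)
    = l.filterMap (fun gh =>
        let ms := skills.filter (fun sk => pvHitL gh.2 (PySem.Str.lower sk))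
        if ms.isEmpty then none else some (gh.1, ms)) := by
  induction l with
  | nil => rfl
  | cons x t ih =>
      cases hem : (skills.filter (fun sk => pvHitL x.2 (PySem.Str.lower sk))).isEmpty <;>
        simp only [List.map_cons, List.filter_cons, List.filterMap_cons, hem,
          Bool.not_false, Bool.not_true, ite_true, ite_false, Bool.false_eq_true, ih]

theorem pv_main (skills : List String) :
    cluster_skills_py skills = cluster_skills_py_alt skills := by
  have hA : cluster_skills_py skills
      = (skills.foldl pvStepA (PySem.Dict.mk
          [("cloud",[]),("data",[]),("backend",[]),("frontend",[]),("ai_ml",[]),("devops",[]),("general",[])])).items.filter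
          (fun kv => !kv.2.isEmpty) := rfl
  rw [hA, pv_fold_eq]
  show ((pvTax.map (fun gh => (gh.1, skills.filter (fun sk => pvHitL gh.2 (PySem.Str.lower sk))))
        ++ [("general", skills.filter pvPg)]).filter (fun kv => !kv.2.isEmpty))
      = if (skills.filter pvPg).isEmpty
        then pvTax.filterMap (fun gh =>
          let ms := skills.filter (fun sk => pvHitL gh.2 (PySem.Str.lower sk))
          if ms.isEmpty then none else some (gh.1, ms))
        else pvTax.filterMap (fun gh =>
          let ms := skills.filter (fun sk => pvHitL gh.2 (PySem.Str.lower sk))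
          if ms.isEmpty then none else some (gh.1, ms)) ++ [("general", skills.filter pvPg)]
  rw [List.filter_append, pv_fmfilter]
  cases h : (skills.filter pvPg).isEmpty <;> simp [List.filter_cons, h]

-- ===== VERDICT (by name: the statement is the Claim_ definition above) =====
theorem cluster_skills_py_spec : Claim_equal_cluster_skills_py := by
  intro skills _
  unfold Spec_cluster_skills_py
  exact pv_main skills
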